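-- pv_equiv track=rewrite | github.com/Akash8585/claso | backend/main.py | generate_commit_from_diff
-- ===== SOURCE A (Python) =====
-- def generate_commit_from_diff(diff_text: str) -> str:
--     """Generate commit message from diff analysis when model is not available"""
--     import re
--
--     # Analyze diff for patterns
--     lines = diff_text.split('\n')
--     added_lines = [line for line in lines if line.startswith('+') and not line.startswith('+++')]
--     removed_lines = [line for line in lines if line.startswith('-') and not line.startswith('---')]
--
--     # Detect common patterns
--     if any('def ' in line or 'function ' in line for line in added_lines):
--         if any('test' in line.lower() for line in added_lines):
--             return "Add unit tests for new functionality"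
--         else:
--             return "Add new function implementation"
--
--     if any('class ' in line for line in added_lines):
--         return "Add new class implementation"
--
--     if any('import ' in line or 'require(' in line for line in added_lines):
--         return "Add new dependencies"
--
--     if any('TODO' in line or 'FIXME' in line for line in added_lines):
--         return "Add TODO comments for future improvements"
--
--     if any('try:' in line or 'catch(' in line for line in added_lines):
--         return "Add error handling"
--
--     if any('if __name__' in line for line in added_lines):
--         return "Add main guard to prevent execution on import"
--
--     if len(added_lines) > len(removed_lines):
--         return "Add new features and functionality"
--     elif len(removed_lines) > len(added_lines):
--         return "Remove deprecated code and cleanup"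
--     else:
--         return "Update code implementation"
-- ===== SOURCE B (Python) =====
-- def generate_commit_from_diff(diff_text: str) -> str:
--     """Generate commit message from diff analysis when model is not available"""
--     has_def = has_test = has_class = has_import = has_todo = has_try = has_main = False
--     n_add = n_rem = 0
--     for line in diff_text.split('\n'):
--         if line.startswith('+') and not line.startswith('+++'):
--             n_add += 1
--             if 'def ' in line or 'function ' in line:
--                 has_def = True
--             if 'test' in line.lower():
--                 has_test = True
--             if 'class ' in line:
--                 has_class = True
--             if 'import ' in line or 'require(' in line:
--                 has_import = True
--             if 'TODO' in line or 'FIXME' in line: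
--                 has_todo = True
--             if 'try:' in line or 'catch(' in line:
--                 has_try = True
--             if 'if __name__' in line:
--                 has_main = True
--         elif line.startswith('-') and not line.startswith('---'):
--             n_rem += 1
--     if has_def:
--         return "Add unit tests for new functionality" if has_test else "Add new function implementation"
--     if has_class:
--         return "Add new class implementation"
--     if has_import:
--         return "Add new dependencies"
--     if has_todo:
--         return "Add TODO comments for future improvements"
--     if has_try:
--         return "Add error handling"
--     if has_main:
--         return "Add main guard to prevent execution on import"
--     if n_add > n_rem:
--         return "Add new features and functionality"
--     elif n_rem > n_add:
--         return "Remove deprecated code and cleanup"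
--     else:
--         return "Update code implementation"
-- ===== Notes on version B (the rewrite author's own statement) =====
-- stated objective: alternative
-- what changed: Replaces the two filtering comprehensions plus up to eight separate any()-scans over added_lines with a single pass over the diff lines that accumulates seven boolean flags and the added/removed counts, then runs the same priority cascade on those flags.
import Mathlib
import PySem

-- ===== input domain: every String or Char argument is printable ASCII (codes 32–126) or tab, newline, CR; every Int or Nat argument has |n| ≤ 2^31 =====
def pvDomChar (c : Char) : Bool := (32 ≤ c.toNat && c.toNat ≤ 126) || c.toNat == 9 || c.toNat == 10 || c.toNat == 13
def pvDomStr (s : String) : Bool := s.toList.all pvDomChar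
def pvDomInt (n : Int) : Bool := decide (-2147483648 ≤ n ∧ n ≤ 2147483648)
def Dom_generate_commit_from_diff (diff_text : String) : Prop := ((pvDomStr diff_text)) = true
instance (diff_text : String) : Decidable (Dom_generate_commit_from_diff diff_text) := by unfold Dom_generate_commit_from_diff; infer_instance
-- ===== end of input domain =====

-- B replaces A's two filter comprehensions and eight separate any()-scans with one fold over the
-- diff lines accumulating seven pattern flags and the added/removed counts, then the same cascade.


-- ===== PORT A =====
def generate_commit_from_diff (diff_text : String) : String :=
  let lines := PySem.Chars.splitOn diff_text.toList "\n".toList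
  let added_lines := lines.filter (fun line => PySem.Chars.startswith line "+".toList && !PySem.Chars.startswith line "+++".toList)
  let removed_lines := lines.filter (fun line => PySem.Chars.startswith line "-".toList && !PySem.Chars.startswith line "---".toList)
  if added_lines.any (fun line => PySem.Chars.isIn "def ".toList line || PySem.Chars.isIn "function ".toList line) then
    if added_lines.any (fun line => PySem.Chars.isIn "test".toList (PySem.Chars.lower line)) then
      "Add unit tests for new functionality"
    else
      "Add new function implementation"
  else if added_lines.any (fun line => PySem.Chars.isIn "class ".toList line) then
    "Add new class implementation"
  else if added_lines.any (fun line => PySem.Chars.isIn "import ".toList line || PySem.Chars.isIn "require(".toList line) then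
    "Add new dependencies"
  else if added_lines.any (fun line => PySem.Chars.isIn "TODO".toList line || PySem.Chars.isIn "FIXME".toList line) then
    "Add TODO comments for future improvements"
  else if added_lines.any (fun line => PySem.Chars.isIn "try:".toList line || PySem.Chars.isIn "catch(".toList line) then
    "Add error handling"
  else if added_lines.any (fun line => PySem.Chars.isIn "if __name__".toList line) then
    "Add main guard to prevent execution on import"
  else if added_lines.length > removed_lines.length then
    "Add new features and functionality"
  else if removed_lines.length > added_lines.length then
    "Remove deprecated code and cleanup"
  else
    "Update code implementation"

-- ===== PORT B =====
-- single-pass accumulator state: (has_def, has_test, has_class, has_import, has_todo, has_try, has_main, n_add, n_rem)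
def gcState := Bool × Bool × Bool × Bool × Bool × Bool × Bool × Nat × Nat

def gcStep (st : gcState) (line : List Char) : gcState :=
  let (hd, ht, hc, hi, hto, htr, hm, na, nr) := st
  if PySem.Chars.startswith line "+".toList && !PySem.Chars.startswith line "+++".toList then
    (hd || (PySem.Chars.isIn "def ".toList line || PySem.Chars.isIn "function ".toList line),
     ht || PySem.Chars.isIn "test".toList (PySem.Chars.lower line),
     hc || PySem.Chars.isIn "class ".toList line,
     hi || (PySem.Chars.isIn "import ".toList line || PySem.Chars.isIn "require(".toList line),
     hto || (PySem.Chars.isIn "TODO".toList line || PySem.Chars.isIn "FIXME".toList line),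
     htr || (PySem.Chars.isIn "try:".toList line || PySem.Chars.isIn "catch(".toList line),
     hm || PySem.Chars.isIn "if __name__".toList line,
     na + 1, nr)
  else if PySem.Chars.startswith line "-".toList && !PySem.Chars.startswith line "---".toList then
    (hd, ht, hc, hi, hto, htr, hm, na, nr + 1)
  else
    (hd, ht, hc, hi, hto, htr, hm, na, nr)

def generate_commit_from_diff_alt (diff_text : String) : String :=
  let (hd, ht, hc, hi, hto, htr, hm, na, nr) :=
    (PySem.Chars.splitOn diff_text.toList "\n".toList).foldl gcStep
      (false, false, false, false, false, false, false, 0, 0)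
  if hd then
    if ht then "Add unit tests for new functionality" else "Add new function implementation"
  else if hc then "Add new class implementation"
  else if hi then "Add new dependencies"
  else if hto then "Add TODO comments for future improvements"
  else if htr then "Add error handling"
  else if hm then "Add main guard to prevent execution on import"
  else if na > nr then "Add new features and functionality"
  else if nr > na then "Remove deprecated code and cleanup"
  else "Update code implementation"

-- ===== PRECONDITION & SPEC =====
def Spec_generate_commit_from_diff (diff_text : String) (out : String) : Prop := out = generate_commit_from_diff_alt diff_text
instance (diff_text : String) (out : String) : Decidable (Spec_generate_commit_from_diff diff_text out) := by unfold Spec_generate_commit_from_diff; infer_instance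

-- ===== CLAIM (what is proved, stated in full; the proofs are below) =====
def Claim_equal_generate_commit_from_diff : Prop := ∀ (diff_text : String), Dom_generate_commit_from_diff diff_text → Spec_generate_commit_from_diff diff_text (generate_commit_from_diff diff_text)

-- ===== LEMMAS AND PROOFS =====

-- proof-only abbreviations for the two line filters
def gcAddP (line : List Char) : Bool :=
  PySem.Chars.startswith line "+".toList && !PySem.Chars.startswith line "+++".toList

def gcRemP (line : List Char) : Bool :=
  PySem.Chars.startswith line "-".toList && !PySem.Chars.startswith line "---".toList

-- a line starting with '+' does not start with '-'
theorem gcAdd_not_rem {x : List Char} (h : PySem.Chars.startswith x "+".toList = true) :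
    gcRemP x = false := by
  obtain ⟨t, rfl⟩ := (PySem.Chars.startswith_iff x "+".toList).mp h
  simp [gcRemP, PySem.Chars.startswith_iff]

-- invariant of B's single pass: the fold state is A's eight scans over the filtered lines
theorem gcFold (lines : List (List Char)) (hd ht hc hi hto htr hm : Bool) (na nr : Nat) :
    lines.foldl gcStep (hd, ht, hc, hi, hto, htr, hm, na, nr) =
      (hd || (lines.filter gcAddP).any (fun l => PySem.Chars.isIn "def ".toList l || PySem.Chars.isIn "function ".toList l),
       ht || (lines.filter gcAddP).any (fun l => PySem.Chars.isIn "test".toList (PySem.Chars.lower l)),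
       hc || (lines.filter gcAddP).any (fun l => PySem.Chars.isIn "class ".toList l),
       hi || (lines.filter gcAddP).any (fun l => PySem.Chars.isIn "import ".toList l || PySem.Chars.isIn "require(".toList l),
       hto || (lines.filter gcAddP).any (fun l => PySem.Chars.isIn "TODO".toList l || PySem.Chars.isIn "FIXME".toList l),
       htr || (lines.filter gcAddP).any (fun l => PySem.Chars.isIn "try:".toList l || PySem.Chars.isIn "catch(".toList l),
       hm || (lines.filter gcAddP).any (fun l => PySem.Chars.isIn "if __name__".toList l),
       na + (lines.filter gcAddP).length,
       nr + (lines.filter gcRemP).length) := by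
  induction lines generalizing hd ht hc hi hto htr hm na nr with
  | nil => simp
  | cons x xs ih =>
    simp only [List.foldl_cons, gcStep]
    by_cases ha : gcAddP x = true
    · have h1 : (PySem.Chars.startswith x "+".toList && !PySem.Chars.startswith x "+++".toList) = true := ha
      have hr : gcRemP x = false := gcAdd_not_rem ((Bool.and_eq_true _ _).mp ha).1
      rw [if_pos h1, ih]
      simp [ha, hr, Bool.or_assoc, Nat.add_comm, Nat.add_left_comm]
    · have h1 : ¬ ((PySem.Chars.startswith x "+".toList && !PySem.Chars.startswith x "+++".toList) = true) := ha
      rw [if_neg h1]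
      have ha' : gcAddP x = false := by simpa using ha
      by_cases hr : gcRemP x = true
      · have h2 : (PySem.Chars.startswith x "-".toList && !PySem.Chars.startswith x "---".toList) = true := hr
        rw [if_pos h2, ih]
        simp [ha', hr, Nat.add_comm, Nat.add_left_comm]
      · have h2 : ¬ ((PySem.Chars.startswith x "-".toList && !PySem.Chars.startswith x "---".toList) = true) := hr
        have hr' : gcRemP x = false := by simpa using hr
        rw [if_neg h2, ih]
        simp [ha', hr']

-- ===== VERDICT (by name: the statement is the Claim_ definition above) =====
theorem generate_commit_from_diff_spec : Claim_equal_generate_commit_from_diff := by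
  intro diff_text _
  unfold Spec_generate_commit_from_diff generate_commit_from_diff generate_commit_from_diff_alt
  rw [gcFold]
  simp only [Bool.false_or, Nat.zero_add, gcAddP]
  rfl
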